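-- pv_equiv track=rewrite | github.com/andreasturesson/Thesis-Project | Dataset/ensemble_process_training_data.py | longest_number_sequence
-- ===== SOURCE A (Python) =====
-- def longest_number_sequence(s):
--     """
--     It returns longest number sequence in a string.
--     For example 'cool123freezers928418' would return '928414'.
--     Taken from: https://github.com/alejandro-g-m/DetExt/tree/91a24bd174f599c6d9551f246f81519b274093af
--     """
--     longest_letterSeq = ''
--     longest_digitSeq = ''
--     i = 0
--
--     while(i<len(s)):
--         curr_letterSeq = ''
--         curr_digitSeq = ''
--
--         while(i<len(s) and s[i].isalpha()):
--             curr_letterSeq += s[i]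
--             i += 1
--
--         while(i<len(s) and s[i].isdigit()):
--             curr_digitSeq += s[i]
--             i += 1
--
--         if(i< len(s) and not(s[i].isdigit()) and not(s[i].isalpha())):
--             i += 1
--
--         if(len(curr_letterSeq) > len(longest_letterSeq)):
--             longest_letterSeq = curr_letterSeq
--
--         if(len(curr_digitSeq) > len(longest_digitSeq)):
--             longest_digitSeq = curr_digitSeq
--     return len(longest_digitSeq)
-- ===== SOURCE B (Python) =====
-- def longest_number_sequence(s):
--     """Length of the longest run of consecutive digit characters in s."""
--     best = cur = 0
--     for ch in s:
--         cur = cur + 1 if ch.isdigit() else 0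
--         if cur > best:
--             best = cur
--     return best
-- ===== Notes on version B (the rewrite author's own statement) =====
-- stated objective: simpler
-- what changed: Replaces A's index-advancing state machine (nested whiles building letter and digit substrings, plus separator skipping) with a single fold over the characters keeping only a current-run counter and a running maximum.
import Mathlib
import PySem

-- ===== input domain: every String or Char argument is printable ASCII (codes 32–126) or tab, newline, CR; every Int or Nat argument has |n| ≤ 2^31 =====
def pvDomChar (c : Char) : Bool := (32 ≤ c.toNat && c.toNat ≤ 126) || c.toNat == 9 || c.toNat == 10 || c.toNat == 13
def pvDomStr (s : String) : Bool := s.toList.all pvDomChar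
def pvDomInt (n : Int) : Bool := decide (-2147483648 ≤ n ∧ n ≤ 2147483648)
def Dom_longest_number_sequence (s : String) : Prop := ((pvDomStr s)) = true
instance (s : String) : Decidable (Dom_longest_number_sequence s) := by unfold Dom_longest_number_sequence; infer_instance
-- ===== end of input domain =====

-- B replaces A's index-advancing state machine (nested whiles building letter and
-- digit substrings) with a single fold keeping a current-run counter and a maximum.

-- ===== PORT A =====
-- inner while: `while i < len(s) and s[i].isalpha(): curr_letterSeq += s[i]; i += 1`
-- (i only ever advances, so consuming the remaining character list is exact)
def pvSpanAlpha : List Char → List Char × List Char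
  | [] => ([], [])
  | c :: cs =>
    if PySem.Chars.isalpha c then
      let p := pvSpanAlpha cs
      (c :: p.1, p.2)
    else ([], c :: cs)

-- inner while: `while i < len(s) and s[i].isdigit(): curr_digitSeq += s[i]; i += 1`
def pvSpanDigit : List Char → List Char × List Char
  | [] => ([], [])
  | c :: cs =>
    if PySem.Chars.isdigit c then
      let p := pvSpanDigit cs
      (c :: p.1, p.2)
    else ([], c :: cs)

-- `if i < len(s) and not s[i].isdigit() and not s[i].isalpha(): i += 1`
def pvSkip : List Char → List Char
  | [] => []
  | c :: cs =>
    if PySem.Chars.isdigit c = false && PySem.Chars.isalpha c = false then cs else c :: cs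

theorem pvSpanAlpha_snd_le (l : List Char) : (pvSpanAlpha l).2.length ≤ l.length := by
  induction l with
  | nil => simp [pvSpanAlpha]
  | cons c cs ih =>
    simp only [pvSpanAlpha]
    split <;> simp <;> omega

theorem pvSpanDigit_snd_le (l : List Char) : (pvSpanDigit l).2.length ≤ l.length := by
  induction l with
  | nil => simp [pvSpanDigit]
  | cons c cs ih =>
    simp only [pvSpanDigit]
    split <;> simp <;> omega

theorem pvSkip_le (l : List Char) : (pvSkip l).length ≤ l.length := by
  cases l with
  | nil => simp [pvSkip]
  | cons c cs => simp only [pvSkip]; split <;> simp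

theorem pvA_dec (c : Char) (cs : List Char) :
    (pvSkip (pvSpanDigit (pvSpanAlpha (c :: cs)).2).2).length < (c :: cs).length := by
  by_cases ha : PySem.Chars.isalpha c = true
  · have h1 : (pvSpanAlpha (c :: cs)).2 = (pvSpanAlpha cs).2 := by simp [pvSpanAlpha, ha]
    have := pvSpanAlpha_snd_le cs
    have := pvSpanDigit_snd_le (pvSpanAlpha cs).2
    have := pvSkip_le (pvSpanDigit (pvSpanAlpha cs).2).2
    simp [h1]; omega
  · have h1 : (pvSpanAlpha (c :: cs)).2 = c :: cs := by simp [pvSpanAlpha, ha]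
    rw [h1]
    by_cases hd : PySem.Chars.isdigit c = true
    · have h2 : (pvSpanDigit (c :: cs)).2 = (pvSpanDigit cs).2 := by simp [pvSpanDigit, hd]
      have := pvSpanDigit_snd_le cs
      have := pvSkip_le (pvSpanDigit cs).2
      simp [h2]; omega
    · have h2 : (pvSpanDigit (c :: cs)).2 = c :: cs := by simp [pvSpanDigit, hd]
      rw [h2]
      have h3 : pvSkip (c :: cs) = cs := by
        simp [pvSkip, Bool.eq_false_iff.mpr ha, Bool.eq_false_iff.mpr hd]
      simp [h3]

-- the outer `while i < len(s)` loop, with state (remaining chars, longest_letterSeq, longest_digitSeq)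
def pvALoop : List Char → List Char → List Char → Nat
  | [], _, lDig => lDig.length
  | c :: cs, lLet, lDig =>
    let p1 := pvSpanAlpha (c :: cs)          -- curr_letterSeq, rest
    let p2 := pvSpanDigit p1.2               -- curr_digitSeq, rest
    let r3 := pvSkip p2.2                    -- optional separator skip
    let lLet' := if p1.1.length > lLet.length then p1.1 else lLet
    let lDig' := if p2.1.length > lDig.length then p2.1 else lDig
    pvALoop r3 lLet' lDig'
termination_by cs _ _ => cs.length
decreasing_by exact pvA_dec c cs

def longest_number_sequence (s : String) : Int :=
  (pvALoop s.toList [] [] : Int)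

-- ===== PORT B =====
-- `for ch in s: cur = cur+1 if ch.isdigit() else 0; if cur > best: best = cur`
def pvBLoop : List Char → Nat → Nat → Nat
  | [], best, _ => best
  | c :: cs, best, cur =>
    let cur' := if PySem.Chars.isdigit c then cur + 1 else 0
    pvBLoop cs (if cur' > best then cur' else best) cur'

def longest_number_sequence_alt (s : String) : Int :=
  (pvBLoop s.toList 0 0 : Int)

-- ===== PRECONDITION & SPEC =====
def Spec_longest_number_sequence (s : String) (out : Int) : Prop := out = longest_number_sequence_alt s
instance (s : String) (out : Int) : Decidable (Spec_longest_number_sequence s out) := by unfold Spec_longest_number_sequence; infer_instance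

-- ===== CLAIM (what is proved, stated in full; the proofs are below) =====
def Claim_equal_longest_number_sequence : Prop := ∀ (s : String), Dom_longest_number_sequence s → Spec_longest_number_sequence s (longest_number_sequence s)

-- ===== LEMMAS AND PROOFS =====

-- common characterisation: pvG cs cur = max over (cur extended by a digit prefix of cs) and all digit runs of cs
def pvG : List Char → Nat → Nat
  | [], cur => cur
  | c :: cs, cur =>
    if PySem.Chars.isdigit c then pvG cs (cur + 1) else max cur (pvG cs 0)

theorem pvG_ge (cs : List Char) (cur : Nat) : cur ≤ pvG cs cur := by
  induction cs generalizing cur with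
  | nil => simp [pvG]
  | cons c cs ih =>
    simp only [pvG]
    split
    · exact le_trans (Nat.le_succ cur) (ih (cur + 1))
    · exact le_max_left _ _

theorem pvB_eq_pvG (cs : List Char) (best cur : Nat) (h : cur ≤ best) :
    pvBLoop cs best cur = max best (pvG cs cur) := by
  induction cs generalizing best cur with
  | nil => simp [pvBLoop, pvG]; omega
  | cons c cs ih =>
    simp only [pvBLoop, pvG]
    by_cases hd : PySem.Chars.isdigit c = true
    · simp only [hd, if_true]
      rw [ih (if cur + 1 > best then cur + 1 else best) (cur + 1) (by split <;> omega)]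
      have := pvG_ge cs (cur + 1)
      split <;> omega
    · simp only [Bool.eq_false_iff.mpr hd, if_false, Bool.false_eq_true]
      rw [ih (if 0 > best then 0 else best) 0 (by omega)]
      have := pvG_ge cs 0
      split <;> omega

theorem alpha_not_digit (c : Char) (h : PySem.Chars.isalpha c = true) :
    PySem.Chars.isdigit c = false := by
  simp [PySem.Chars.isalpha, PySem.Chars.isdigit, PySem.Chars.isupper, PySem.Chars.islower,
    Char.le_def, UInt32.le_iff_toNat_le] at *
  omega

theorem pvSpanAlpha_eq (l : List Char) :
    pvSpanAlpha l = (l.takeWhile PySem.Chars.isalpha, l.dropWhile PySem.Chars.isalpha) := by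
  induction l with
  | nil => simp [pvSpanAlpha]
  | cons c cs ih =>
    simp only [pvSpanAlpha, List.takeWhile_cons, List.dropWhile_cons]
    split <;> simp_all

theorem pvSpanDigit_eq (l : List Char) :
    pvSpanDigit l = (l.takeWhile PySem.Chars.isdigit, l.dropWhile PySem.Chars.isdigit) := by
  induction l with
  | nil => simp [pvSpanDigit]
  | cons c cs ih =>
    simp only [pvSpanDigit, List.takeWhile_cons, List.dropWhile_cons]
    split <;> simp_all

theorem pvG_nondigit_prefix (p t : List Char) (h : ∀ c ∈ p, PySem.Chars.isdigit c = false) :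
    pvG (p ++ t) 0 = pvG t 0 := by
  induction p with
  | nil => simp
  | cons c cs ih =>
    have hc := h c (List.mem_cons_self ..)
    simp only [List.cons_append, pvG, hc]
    simp [ih (fun c hm => h c (List.mem_cons_of_mem _ hm))]

theorem pvG_digit_prefix (d t : List Char) (k : Nat) (h : ∀ c ∈ d, PySem.Chars.isdigit c = true) :
    pvG (d ++ t) k = pvG t (k + d.length) := by
  induction d generalizing k with
  | nil => simp
  | cons c cs ih =>
    have hc := h c (List.mem_cons_self ..)
    simp only [List.cons_append, pvG, hc, if_true]
    rw [ih (k + 1) (fun c hm => h c (List.mem_cons_of_mem _ hm))]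
    simp; ring_nf

-- the head of `dropWhile p` (if any) falsifies p
theorem head_dropWhile_false (p : Char → Bool) : ∀ (l : List Char) (c : Char) (t : List Char),
    l.dropWhile p = c :: t → p c = false := by
  intro l
  induction l with
  | nil => intro c t h; simp [List.dropWhile] at h
  | cons a as ih =>
    intro c t h
    rw [List.dropWhile_cons] at h
    by_cases hp : p a = true
    · rw [if_pos hp] at h; exact ih c t h
    · rw [if_neg hp] at h; cases h; exact Bool.eq_false_iff.mpr hp

theorem pvG_decompose (c : Char) (cs : List Char) :
    pvG (c :: cs) 0 =
      max (pvSpanDigit (pvSpanAlpha (c :: cs)).2).1.length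
          (pvG (pvSkip (pvSpanDigit (pvSpanAlpha (c :: cs)).2).2) 0) := by
  set l := c :: cs with hl
  rw [pvSpanAlpha_eq, pvSpanDigit_eq]
  simp only []
  have hsplit1 : l = l.takeWhile PySem.Chars.isalpha ++ l.dropWhile PySem.Chars.isalpha :=
    (List.takeWhile_append_dropWhile).symm
  set r1 := l.dropWhile PySem.Chars.isalpha with hr1
  have hsplit2 : r1 = r1.takeWhile PySem.Chars.isdigit ++ r1.dropWhile PySem.Chars.isdigit :=
    (List.takeWhile_append_dropWhile).symm
  set digs := r1.takeWhile PySem.Chars.isdigit with hdigs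
  set r2 := r1.dropWhile PySem.Chars.isdigit with hr2
  have h1 : pvG l 0 = pvG r1 0 := by
    conv_lhs => rw [hsplit1]
    exact pvG_nondigit_prefix _ _
      (fun c hm => alpha_not_digit c (List.mem_takeWhile_imp hm))
  have h2 : pvG r1 0 = pvG r2 digs.length := by
    conv_lhs => rw [hsplit2]
    rw [pvG_digit_prefix _ _ 0 (fun c hm => List.mem_takeWhile_imp hm)]
    simp
    rfl
  rw [h1, h2]
  cases hr : r2 with
  | nil => simp [pvSkip, pvG]
  | cons c' t =>
    have hnd : PySem.Chars.isdigit c' = false := head_dropWhile_false _ r1 c' t (hr2 ▸ hr)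
    have hgr : pvG (c' :: t) digs.length = max digs.length (pvG t 0) := by
      simp [pvG, hnd]
    rw [hgr]
    by_cases ha : PySem.Chars.isalpha c' = true
    · have : pvSkip (c' :: t) = c' :: t := by simp [pvSkip, ha]
      rw [this]
      simp [pvG, hnd]
    · have : pvSkip (c' :: t) = t := by
        simp [pvSkip, hnd, Bool.eq_false_iff.mpr ha]
      rw [this]

theorem pvA_eq_pvG (cs lLet lDig : List Char) :
    pvALoop cs lLet lDig = max lDig.length (pvG cs 0) := by
  induction hn : cs.length using Nat.strong_induction_on generalizing cs lLet lDig with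
  | _ n ih =>
    cases cs with
    | nil => simp [pvALoop, pvG]
    | cons c cs' =>
      rw [pvALoop]
      have hdec := pvA_dec c cs'
      rw [ih _ (hn ▸ hdec) _ _ _ rfl]
      rw [pvG_decompose c cs']
      have hlen : (if (pvSpanDigit (pvSpanAlpha (c :: cs')).2).1.length > lDig.length
          then (pvSpanDigit (pvSpanAlpha (c :: cs')).2).1 else lDig).length
          = max lDig.length (pvSpanDigit (pvSpanAlpha (c :: cs')).2).1.length := by
        split <;> omega
      rw [hlen]
      omega

-- ===== VERDICT (by name: the statement is the Claim_ definition above) =====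
theorem longest_number_sequence_spec : Claim_equal_longest_number_sequence := by
  intro s _
  unfold Spec_longest_number_sequence longest_number_sequence longest_number_sequence_alt
  rw [pvA_eq_pvG, pvB_eq_pvG _ _ _ (le_refl 0)]
  simp
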